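-- pv_equiv track=rewrite | github.com/vichauvi/synonyms | synonyms.py | file_punc_cleaner
-- ===== SOURCE A (Python) =====
-- def file_punc_cleaner(file):
--     ch_start = 0
--     lst = []
--     '''return a list in the format of [[word,word,word],[sentence],...]'''
--     for ch in range(len(file)):
--         if file[ch] in ['?','.','!']:
--             lst += [[file[ch_start:ch]]]
--             ch_start = ch+2
--
--     for s in range(len(lst)):
--         for i in range(len(lst[s])):
--             for ch in lst[s][i]:
--                 if ch in [",", "-", "--", ":", ";"]:
--                     lst[s][i] = (lst[s][i]).replace(ch,"")
--
--             lst[s] = lst[s][i].lower().split()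
--     return lst
-- ===== SOURCE B (Python) =====
-- def file_punc_cleaner(file):
--     '''return a list in the format of [[word,word,word],[sentence],...]'''
--     result = []
--     start = 0
--     for ch in range(len(file)):
--         if file[ch] in '?.!':
--             sentence = file[start:ch]
--             for c in ',-:;':
--                 sentence = sentence.replace(c, '')
--             result.append(sentence.lower().split())
--             start = ch + 2
--     return result
-- ===== Notes on version B (the rewrite author's own statement) =====
-- stated objective: simpler
-- what changed: B fuses A's two passes into one scan: each sentence slice is cleaned and split the moment its terminator is found, removing the intermediate list-of-singleton-lists and its three nested index loops, and the punctuation-removal loop iterates over the four removal characters instead of over every character of the sentence.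
import Mathlib
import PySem

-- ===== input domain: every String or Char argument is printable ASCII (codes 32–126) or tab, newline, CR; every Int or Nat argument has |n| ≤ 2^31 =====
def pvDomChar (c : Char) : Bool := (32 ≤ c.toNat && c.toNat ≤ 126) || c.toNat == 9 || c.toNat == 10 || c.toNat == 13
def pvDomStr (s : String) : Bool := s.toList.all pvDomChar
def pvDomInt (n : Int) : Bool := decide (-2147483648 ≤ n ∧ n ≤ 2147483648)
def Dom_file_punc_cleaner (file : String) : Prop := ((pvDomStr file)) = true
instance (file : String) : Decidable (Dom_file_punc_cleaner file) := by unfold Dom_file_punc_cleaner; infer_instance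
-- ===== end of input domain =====

-- B fuses A's two passes into one scan (clean + split each sentence when its terminator is found),
-- and removes punctuation by iterating the four removal characters; objective: simpler.

-- ===== PORT A =====
def file_punc_cleaner (file : String) : List (List String) :=
  -- first loop: for ch in range(len(file)): collect [file[ch_start:ch]] at each terminator
  let lst :=
    ((PySem.List.pyRange 0 (PySem.Str.len file) 1).foldl
      (fun st ch =>
        -- file[ch]: ch ∈ range(len(file)) so always in range; the getD default is unreachable (exact)
        if (PySem.Str.pyGet? file ch).getD ' ' ∈ ['?', '.', '!'] then
          (ch + 2, st.2 ++ [[PySem.Str.slice file (some st.1) (some ch)]])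
        else st)
      ((0 : Int), ([] : List (List String)))).2
  -- second loop nest: index-based in-place mutation of lst, ported with List.getD / List.set
  (PySem.List.pyRange 0 (lst.length : Int) 1).foldl
    (fun lst s =>
      let sIdx := s.toNat  -- s ∈ range(len(lst)): nonnegative and in range (exact)
      let sent := lst.getD sIdx []
      -- the body only rewrites slot s, so lst[s] is threaded as `cur` and written back once (exact)
      let cur1 :=
        (PySem.List.pyRange 0 (sent.length : Int) 1).foldl
          (fun cur i =>
            let iIdx := i.toNat  -- i ∈ range(len(lst[s])): nonnegative and in range (exact)
            -- `for ch in lst[s][i]` iterates the string value read once at loop entry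
            let str0 := cur.getD iIdx ""
            let cur2 := str0.toList.foldl
              (fun cur ch =>
                -- the "--" entry of the Python list can never equal a single character: dropped (exact)
                if ch ∈ [',', '-', ':', ';'] then
                  cur.set iIdx (PySem.Str.replace (cur.getD iIdx "") (String.ofList [ch]) "")
                else cur)
              cur
            PySem.Str.split₀ (PySem.Str.lower (cur2.getD iIdx "")))
          sent
      lst.set sIdx cur1)
    lst

-- ===== PORT B =====
def file_punc_cleaner_alt (file : String) : List (List String) :=
  ((PySem.List.pyRange 0 (PySem.Str.len file) 1).foldl
    (fun st ch =>
      -- file[ch] in '?.!': a one-character needle, so the substring test is character membership (exact);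
      -- ch is in range, the getD default is unreachable (exact)
      if (PySem.Str.pyGet? file ch).getD ' ' ∈ "?.!".toList then
        let sentence := PySem.Str.slice file (some st.1) (some ch)
        let cleaned := ",-:;".toList.foldl
          (fun s c => PySem.Str.replace s (String.ofList [c]) "") sentence
        (ch + 2, st.2 ++ [PySem.Str.split₀ (PySem.Str.lower cleaned)])
      else st)
    ((0 : Int), ([] : List (List String)))).2

-- ===== PRECONDITION & SPEC =====
def Spec_file_punc_cleaner (file : String) (out : List (List String)) : Prop := out = file_punc_cleaner_alt file
instance (file : String) (out : List (List String)) : Decidable (Spec_file_punc_cleaner file out) := by unfold Spec_file_punc_cleaner; infer_instance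

-- ===== CLAIM (what is proved, stated in full; the proofs are below) =====
def Claim_equal_file_punc_cleaner : Prop := ∀ (file : String), Dom_file_punc_cleaner file → Spec_file_punc_cleaner file (file_punc_cleaner file)

-- ===== LEMMAS AND PROOFS =====

theorem pv_replace_go (c : Char) : ∀ (fuel : Nat) (l acc : List Char), l.length ≤ fuel →
    PySem.Chars.replace.go [c] [] fuel l acc = acc.reverse ++ l.filter (· ≠ c) := by
  intro fuel
  induction fuel with
  | zero => intro l acc h
            have : l = [] := by simpa using h
            subst this; simp [PySem.Chars.replace.go]
  | succ n ih =>
    intro l acc h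
    cases l with
    | nil => simp [PySem.Chars.replace.go]
    | cons c' t =>
      have ht : t.length ≤ n := by simpa using h
      simp only [PySem.Chars.replace.go, List.isPrefixOf]
      by_cases hc : c = c'
      · subst hc
        simp only [BEq.rfl, Bool.true_and, if_true, List.drop, List.reverse_nil, List.nil_append, List.length_cons, List.length_nil]
        rw [ih t acc ht]
        simp
      · simp only [beq_eq_false_iff_ne.mpr hc, Bool.false_and]
        rw [if_neg (by simp), ih t (c' :: acc) ht]
        simp [Ne.symm hc]

theorem pv_replace_filter (s : String) (c : Char) :
    (PySem.Str.replace s (String.ofList [c]) "").toList = s.toList.filter (· ≠ c) := by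
  rw [PySem.Str.toList_replace]
  have h1 : (String.ofList [c]).toList = [c] := by simp
  have h2 : ("" : String).toList = [] := by simp
  rw [h1, h2, PySem.Chars.replace]
  rw [if_neg (by simp)]
  rw [pv_replace_go c s.toList.length s.toList [] (le_refl _)]
  simp

abbrev pvRS : List Char := [',', '-', ':', ';']

def pvFC (t : List Char) (u : String) : String :=
  t.foldl (fun u ch => if ch ∈ pvRS then PySem.Str.replace u (String.ofList [ch]) "" else u) u

theorem pv_singleton_fold (t : List Char) (u : String) :
    t.foldl (fun cur ch => if ch ∈ pvRS then
        cur.set 0 (PySem.Str.replace (cur.getD 0 "") (String.ofList [ch]) "") else cur) [u]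
      = [pvFC t u] := by
  induction t generalizing u with
  | nil => rfl
  | cons ch t ih =>
    simp only [List.foldl_cons, pvFC]
    by_cases h : ch ∈ pvRS
    · simp only [if_pos h, List.getD, List.set, List.getElem?_cons_zero, Option.getD_some]
      exact ih _
    · simp only [if_neg h]; exact ih u

theorem pv_fc_toList (t : List Char) (u : String) :
    (pvFC t u).toList = u.toList.filter (fun c => decide ¬(c ∈ pvRS ∧ c ∈ t)) := by
  induction t generalizing u with
  | nil => simp [pvFC]
  | cons ch t ih =>
    simp only [pvFC, List.foldl_cons]
    by_cases h : ch ∈ pvRS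
    · rw [if_pos h]
      rw [show (t.foldl (fun u ch => if ch ∈ pvRS then PySem.Str.replace u (String.ofList [ch]) "" else u) (PySem.Str.replace u (String.ofList [ch]) "")) = pvFC t (PySem.Str.replace u (String.ofList [ch]) "") from rfl]
      rw [ih, pv_replace_filter, List.filter_filter]
      apply List.filter_congr
      intro c _
      by_cases hc : c = ch
      · subst hc; simp [h]
      · simp [hc]
    · rw [if_neg h]
      rw [show (t.foldl (fun u ch => if ch ∈ pvRS then PySem.Str.replace u (String.ofList [ch]) "" else u) u) = pvFC t u from rfl, ih]
      apply List.filter_congr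
      intro c _
      by_cases hc : c = ch
      · subst hc; simp [h]
      · simp [hc]

theorem pv_fcB (cs : List Char) (u : String) :
    (cs.foldl (fun s c => PySem.Str.replace s (String.ofList [c]) "") u).toList
      = u.toList.filter (fun c => decide (c ∉ cs)) := by
  induction cs generalizing u with
  | nil => simp
  | cons c cs ih =>
    simp only [List.foldl_cons]
    rw [ih, pv_replace_filter, List.filter_filter]
    apply List.filter_congr
    intro x _
    by_cases hx : x = c
    · subst hx; simp
    · simp [hx]


def pvCleanA (s : String) : String := pvFC s.toList s

def pvCleanB (s : String) : String :=
  ",-:;".toList.foldl (fun s c => PySem.Str.replace s (String.ofList [c]) "") s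

theorem pv_clean_eq (u : String) : pvCleanB u = pvCleanA u := by
  apply String.toList_inj.mp
  rw [pvCleanA, pvCleanB, pv_fc_toList, pv_fcB]
  apply List.filter_congr
  intro c hc
  have h4 : (",-:;".toList) = pvRS := by decide
  rw [h4]
  simp [hc]

def pvSents (file : String) : List Int → Int → List String
  | [], _ => []
  | ch :: L, st =>
    if (PySem.Str.pyGet? file ch).getD ' ' ∈ ['?', '.', '!'] then
      PySem.Str.slice file (some st) (some ch) :: pvSents file L (ch + 2)
    else pvSents file L st

def pvStepA (file : String) : Int × List (List String) → Int → Int × List (List String) :=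
  fun st ch =>
    if (PySem.Str.pyGet? file ch).getD ' ' ∈ ['?', '.', '!'] then
      (ch + 2, st.2 ++ [[PySem.Str.slice file (some st.1) (some ch)]])
    else st

def pvStepB (file : String) : Int × List (List String) → Int → Int × List (List String) :=
  fun st ch =>
    if (PySem.Str.pyGet? file ch).getD ' ' ∈ "?.!".toList then
      (ch + 2, st.2 ++ [PySem.Str.split₀ (PySem.Str.lower
        (pvCleanB (PySem.Str.slice file (some st.1) (some ch))))])
    else st

def pvStep2 : List (List String) → Int → List (List String) :=
  fun lst s =>
    lst.set s.toNat
      ((PySem.List.pyRange 0 ((lst.getD s.toNat []).length : Int)).foldl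
        (fun cur i =>
          PySem.Str.split₀ (PySem.Str.lower
            ((((cur.getD i.toNat "").toList.foldl
              (fun cur ch =>
                if ch ∈ [',', '-', ':', ';'] then
                  cur.set i.toNat (PySem.Str.replace (cur.getD i.toNat "") (String.ofList [ch]) "")
                else cur)
              cur)).getD i.toNat "")))
        (lst.getD s.toNat []))

theorem pv_phase1A (file : String) : ∀ (L : List Int) (st : Int) (acc : List (List String)),
    (L.foldl (pvStepA file) (st, acc)).2 = acc ++ (pvSents file L st).map (fun s => [s]) := by
  intro L
  induction L with
  | nil => intro st acc; simp [pvSents]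
  | cons ch L ih =>
    intro st acc
    simp only [List.foldl_cons, pvSents]
    by_cases h : (PySem.Str.pyGet? file ch).getD ' ' ∈ ['?', '.', '!']
    · rw [show pvStepA file (st, acc) ch
          = (ch + 2, acc ++ [[PySem.Str.slice file (some st) (some ch)]]) from by
            simp only [pvStepA]; rw [if_pos h], ih, if_pos h]
      simp
    · rw [show pvStepA file (st, acc) ch = (st, acc) from by
            simp only [pvStepA]; rw [if_neg h], ih, if_neg h]

theorem pv_phase1B (file : String) : ∀ (L : List Int) (st : Int) (acc : List (List String)),
    (L.foldl (pvStepB file) (st, acc)).2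
      = acc ++ (pvSents file L st).map (fun s => PySem.Str.split₀ (PySem.Str.lower (pvCleanA s))) := by
  intro L
  induction L with
  | nil => intro st acc; simp [pvSents]
  | cons ch L ih =>
    intro st acc
    have hq : ("?.!".toList) = ['?', '.', '!'] := by decide
    simp only [List.foldl_cons, pvSents]
    by_cases h : (PySem.Str.pyGet? file ch).getD ' ' ∈ ['?', '.', '!']
    · rw [show pvStepB file (st, acc) ch
          = (ch + 2, acc ++ [PySem.Str.split₀ (PySem.Str.lower
              (pvCleanB (PySem.Str.slice file (some st) (some ch))))]) from by
            simp only [pvStepB, hq]; rw [if_pos h], ih, if_pos h]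
      simp [pv_clean_eq]
    · rw [show pvStepB file (st, acc) ch = (st, acc) from by
            simp only [pvStepB, hq]; rw [if_neg h], ih, if_neg h]

theorem pv_phase2 (xs : List String) : ∀ (done : List (List String)),
    ((PySem.List.pyRange (done.length : Int) ((done.length + xs.length : Nat) : Int)).foldl
        pvStep2 (done ++ xs.map (fun s => [s])))
      = done ++ xs.map (fun s => PySem.Str.split₀ (PySem.Str.lower (pvCleanA s))) := by
  induction xs with
  | nil =>
    intro done
    have h0 : PySem.List.pyRange (done.length : Int) ((done.length + ([] : List String).length : Nat) : Int) = [] := by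
      simp [PySem.List.pyRange]
    rw [h0]
    simp
  | cons x t ih =>
    intro done
    have hlt : (done.length : Int) < ((done.length + (x :: t).length : Nat) : Int) := by
      simp
    rw [PySem.List.pyRange_one_cons hlt, List.foldl_cons]
    have hstep : pvStep2 (done ++ (x :: t).map (fun s => [s])) ((done.length : Nat) : Int)
        = (done ++ [PySem.Str.split₀ (PySem.Str.lower (pvCleanA x))]) ++ t.map (fun s => [s]) := by
      rw [pvStep2]
      rw [show (((done.length : Nat) : Int)).toNat = done.length from by simp]
      have hsent : ((done ++ (x :: t).map (fun s => [s])).getD done.length []) = [x] := by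
        simp [List.getD]
      rw [hsent]
      have h1 : ((([x] : List String).length : Nat) : Int) = (1 : Int) := by simp
      rw [h1, show PySem.List.pyRange (0 : Int) 1 = [0] from by
        rw [PySem.List.pyRange_one_cons (by norm_num)]; simp [PySem.List.pyRange],
        List.foldl_cons, List.foldl_nil]
      rw [show ((0 : Int)).toNat = 0 from rfl]
      rw [show (([x] : List String).getD 0 "") = x from rfl]
      rw [pv_singleton_fold x.toList x]
      rw [show (([pvFC x.toList x]).getD 0 "") = pvFC x.toList x from rfl]
      rw [show pvFC x.toList x = pvCleanA x from rfl]
      simp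
    rw [hstep]
    have hb1 : ((done.length : Nat) : Int) + 1
        = (((done ++ [PySem.Str.split₀ (PySem.Str.lower (pvCleanA x))]).length : Nat) : Int) := by
      simp
    have hb2 : ((done.length + (x :: t).length : Nat) : Int)
        = (((done ++ [PySem.Str.split₀ (PySem.Str.lower (pvCleanA x))]).length + t.length : Nat) : Int) := by
      push_cast; simp; omega
    rw [hb1, hb2, ih]
    simp

theorem pv_main (file : String) : file_punc_cleaner file = file_punc_cleaner_alt file := by
  have hA : file_punc_cleaner file =
      (PySem.List.pyRange 0
          (((((PySem.List.pyRange 0 (PySem.Str.len file) 1).foldl (pvStepA file)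
              ((0 : Int), ([] : List (List String)))).2).length : Int)) 1).foldl
        pvStep2
        (((PySem.List.pyRange 0 (PySem.Str.len file) 1).foldl (pvStepA file)
          ((0 : Int), ([] : List (List String)))).2) := rfl
  have hB : file_punc_cleaner_alt file =
      ((PySem.List.pyRange 0 (PySem.Str.len file) 1).foldl (pvStepB file)
        ((0 : Int), ([] : List (List String)))).2 := rfl
  rw [hA, hB, pv_phase1A, pv_phase1B]
  simp only [List.nil_append]
  simpa using pv_phase2 (pvSents file (PySem.List.pyRange 0 (PySem.Str.len file) 1) 0) []


-- ===== VERDICT (by name: the statement is the Claim_ definition above) =====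
theorem file_punc_cleaner_spec : Claim_equal_file_punc_cleaner := by
  intro file _
  unfold Spec_file_punc_cleaner
  exact pv_main file
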